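-- pv_equiv track=rewrite | github.com/adrianyoung/TestCase_0217 | no_name_.py | no_name_
-- ===== SOURCE A (Python) =====
-- def no_name_(a, b):
--
--     if len(a) != len(b):
--         return False
--
--     dict_a = {}
--     dict_b = {}
--     for x,y in zip(a, b):
--         dict_a[x] = dict_a.get(x, 0) + 1
--         dict_b[y] = dict_b.get(y, 0) + 1
--
--     return dict_a == dict_b
-- ===== SOURCE B (Python) =====
-- def no_name_(a, b):
--     if len(a) != len(b):
--         return False
--     rest = list(b)
--     for x in a:
--         try:
--             rest.remove(x)
--         except ValueError:
--             return False
--     return True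
-- ===== Notes on version B (the rewrite author's own statement) =====
-- stated objective: alternative
-- what changed: Replaces A's dict-based frequency counting (two count dicts built in one zip loop, compared with dict equality) by a dict-free successive-removal algorithm: copy b and remove the first occurrence of each element of a from the copy, failing if one is missing; correct since equal lengths plus sub-multiset containment forces multiset equality.
import Mathlib
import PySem

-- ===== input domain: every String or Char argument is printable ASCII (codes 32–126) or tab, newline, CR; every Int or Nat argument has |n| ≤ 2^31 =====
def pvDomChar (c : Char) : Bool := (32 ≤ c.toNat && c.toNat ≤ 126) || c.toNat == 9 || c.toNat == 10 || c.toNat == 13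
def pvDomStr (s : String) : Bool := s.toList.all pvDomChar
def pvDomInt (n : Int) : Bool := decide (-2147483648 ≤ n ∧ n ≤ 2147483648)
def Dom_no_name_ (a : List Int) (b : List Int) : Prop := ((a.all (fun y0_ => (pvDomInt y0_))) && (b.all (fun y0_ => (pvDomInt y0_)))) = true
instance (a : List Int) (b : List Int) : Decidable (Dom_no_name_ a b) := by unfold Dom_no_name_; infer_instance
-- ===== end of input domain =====

-- B replaces A's dict-based frequency counting by a dict-free successive-removal
-- algorithm over a copy of b (alternative decomposition, not claimed faster).

-- ===== PORT A =====
-- Python's `dict_a == dict_b` ignores insertion order: ported as size equality plus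
-- every (key, value) item of dict_a found by lookup in dict_b (exact mapping equality).
def pyDictEq (d1 d2 : PySem.Dict Int Int) : Bool :=
  d1.size == d2.size && d1.items.all (fun kv => d2.get? kv.1 == some kv.2)

def no_name_ (a : List Int) (b : List Int) : Bool :=
  if a.length != b.length then false
  else
    let p := (a.zip b).foldl
      (fun (s : PySem.Dict Int Int × PySem.Dict Int Int) (xy : Int × Int) =>
        (s.1.insert xy.1 (s.1.getD xy.1 0 + 1), s.2.insert xy.2 (s.2.getD xy.2 0 + 1)))
      (PySem.Dict.empty, PySem.Dict.empty)
    pyDictEq p.1 p.2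

-- ===== PORT B =====
-- the for-loop over a with the mutable list `rest`: remove first occurrence or fail
def altLoop : List Int → List Int → Bool
  | [], _ => true
  | x :: t, rest =>
    match PySem.List.remove? rest x with
    | none => false          -- rest.remove(x) raised ValueError → return False
    | some r => altLoop t r

def no_name__alt (a : List Int) (b : List Int) : Bool :=
  if a.length != b.length then false
  else altLoop a b

-- ===== PRECONDITION & SPEC =====
def Spec_no_name_ (a : List Int) (b : List Int) (out : Bool) : Prop := out = no_name__alt a b
instance (a : List Int) (b : List Int) (out : Bool) : Decidable (Spec_no_name_ a b out) := by unfold Spec_no_name_; infer_instance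

-- ===== CLAIM (what is proved, stated in full; the proofs are below) =====
def Claim_equal_no_name_ : Prop := ∀ (a : List Int) (b : List Int), Dom_no_name_ a b → Spec_no_name_ a b (no_name_ a b)

-- ===== LEMMAS AND PROOFS =====

theorem get?_counter_of_mem {b : List Int} {k : Int} (h : k ∈ b) :
    (PySem.Dict.counter b).get? k = some ((b.count k : Int)) := by
  have hc : (PySem.Dict.counter b).contains k = true := by
    rw [PySem.Dict.contains_counter]; simpa using h
  cases hv : (PySem.Dict.counter b).get? k with
  | none => rw [PySem.Dict.get?_eq_none_iff_contains] at hv; simp [hv] at hc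
  | some v =>
      have hgd := PySem.Dict.getD_of_get?_eq_some (PySem.Dict.counter b) (0 : Int) hv
      rw [PySem.Dict.getD_counter] at hgd
      rw [← hgd]

theorem get?_counter_of_not_mem {b : List Int} {k : Int} (h : k ∉ b) :
    (PySem.Dict.counter b).get? k = none := by
  rw [PySem.Dict.get?_eq_none_iff_contains, PySem.Dict.contains_counter]
  simpa using h

-- characterisation of A's result (under equal lengths)
theorem no_name_iff {a b : List Int} (h : a.length = b.length) :
    no_name_ a b = true ↔
      ((PySem.Set.ofList a).length = (PySem.Set.ofList b).length ∧
        ∀ k ∈ a, k ∈ b ∧ b.count k = a.count k) := by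
  have hred : no_name_ a b = pyDictEq (PySem.Dict.counter a) (PySem.Dict.counter b) := by
    unfold no_name_
    simp only [h, bne_self_eq_false, Bool.false_eq_true, if_false]
    rw [PySem.List.foldl_prod_mk
          (f := fun (d : PySem.Dict Int Int) (xy : Int × Int) => d.insert xy.1 (d.getD xy.1 0 + 1))
          (g := fun (d : PySem.Dict Int Int) (xy : Int × Int) => d.insert xy.2 (d.getD xy.2 0 + 1))]
    rw [← List.foldl_map (g := fun (d : PySem.Dict Int Int) (x : Int) => d.insert x (d.getD x 0 + 1))
          (f := (Prod.fst : Int × Int → Int))]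
    rw [← List.foldl_map (g := fun (d : PySem.Dict Int Int) (x : Int) => d.insert x (d.getD x 0 + 1))
          (f := (Prod.snd : Int × Int → Int))]
    rw [List.map_fst_zip (le_of_eq h), List.map_snd_zip (le_of_eq h.symm)]
    rw [PySem.Dict.foldl_insert_getD_add_one_eq_counter, PySem.Dict.foldl_insert_getD_add_one_eq_counter]
  rw [hred]
  constructor
  · intro hx
    simp only [pyDictEq, Bool.and_eq_true, beq_iff_eq, List.all_eq_true] at hx
    obtain ⟨hs, hall⟩ := hx
    constructor
    · simpa [PySem.Dict.size, PySem.Dict.items_counter] using hs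
    · intro k hk
      have hmem : (k, (a.count k : Int)) ∈ (PySem.Dict.counter a).items := by
        rw [PySem.Dict.items_counter]
        exact List.mem_map.2 ⟨k, (PySem.Set.mem_ofList _ _).2 hk, rfl⟩
      have hcond := hall _ hmem
      by_cases hkb : k ∈ b
      · rw [get?_counter_of_mem hkb] at hcond
        simp only [Option.some.injEq, Nat.cast_inj] at hcond
        exact ⟨hkb, hcond⟩
      · rw [get?_counter_of_not_mem hkb] at hcond; simp at hcond
  · rintro ⟨hs, hall⟩
    simp only [pyDictEq, Bool.and_eq_true, beq_iff_eq, List.all_eq_true]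
    refine ⟨by simpa [PySem.Dict.size, PySem.Dict.items_counter] using hs, ?_⟩
    intro kv hkv
    rw [PySem.Dict.items_counter] at hkv
    obtain ⟨k, hk, rfl⟩ := List.mem_map.1 hkv
    have hk' : k ∈ a := (PySem.Set.mem_ofList _ _).1 hk
    obtain ⟨hkb, hc⟩ := hall k hk'
    rw [get?_counter_of_mem hkb]
    simp [hc]

-- A's condition is exactly `a ~ b` (when lengths agree)
theorem A_iff_perm {a b : List Int} (h : a.length = b.length) :
    no_name_ a b = true ↔ a.Perm b := by
  rw [no_name_iff h]
  constructor
  · rintro ⟨hs, hall⟩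
    have hsub : PySem.Set.ofList a ⊆ PySem.Set.ofList b := by
      intro k hk
      rw [PySem.Set.mem_ofList] at hk ⊢
      exact (hall k hk).1
    have hsp : (PySem.Set.ofList a).Subperm (PySem.Set.ofList b) :=
      List.subperm_of_subset (PySem.Set.nodup_ofList _) hsub
    have hperm : (PySem.Set.ofList a).Perm (PySem.Set.ofList b) :=
      hsp.perm_of_length_le (le_of_eq hs.symm)
    rw [List.perm_iff_count]
    intro k
    by_cases hk : k ∈ a
    · exact (hall k hk).2.symm
    · have hkb : k ∉ b := by
        intro hkb
        apply hk
        have : k ∈ PySem.Set.ofList a := by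
          rw [hperm.mem_iff, PySem.Set.mem_ofList]; exact hkb
        rwa [PySem.Set.mem_ofList] at this
      simp [List.count_eq_zero_of_not_mem hk, List.count_eq_zero_of_not_mem hkb]
  · intro hp
    have hperm : (PySem.Set.ofList a).Perm (PySem.Set.ofList b) := by
      rw [List.perm_ext_iff_of_nodup (PySem.Set.nodup_ofList _) (PySem.Set.nodup_ofList _)]
      intro k
      rw [PySem.Set.mem_ofList, PySem.Set.mem_ofList]
      exact hp.mem_iff
    exact ⟨hperm.length_eq, fun k hk => ⟨hp.mem_iff.1 hk, (hp.count_eq k).symm⟩⟩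

-- the removal loop succeeds iff a is a sub-multiset of rest
theorem altLoop_iff (a : List Int) : ∀ rest : List Int,
    altLoop a rest = true ↔ ∀ k, a.count k ≤ rest.count k := by
  induction a with
  | nil => intro rest; simp [altLoop]
  | cons x t ih =>
      intro rest
      by_cases hx : x ∈ rest
      · rw [show altLoop (x :: t) rest = altLoop t (rest.erase x) by
              simp [altLoop, PySem.List.remove?_eq_some_erase rest x hx]]
        rw [ih]
        have hpos : 1 ≤ rest.count x := List.count_pos_iff.2 hx
        constructor
        · intro hc k
          by_cases hkx : k = x
          · have h1 := hc x
            rw [List.count_erase_self] at h1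
            rw [hkx, List.count_cons_self]
            omega
          · have h1 := hc k
            rw [List.count_erase_of_ne hkx] at h1
            rw [List.count_cons_of_ne (Ne.symm hkx)]
            exact h1
        · intro hc k
          by_cases hkx : k = x
          · have h1 := hc x
            rw [List.count_cons_self] at h1
            rw [hkx, List.count_erase_self]
            omega
          · have h1 := hc k
            rw [List.count_cons_of_ne (Ne.symm hkx)] at h1
            rw [List.count_erase_of_ne hkx]
            exact h1
      · rw [show altLoop (x :: t) rest = false by
              simp [altLoop, (PySem.List.remove?_eq_none_iff rest x).2 hx]]
        simp only [Bool.false_eq_true, false_iff, not_forall, not_le]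
        exact ⟨x, by
          rw [List.count_eq_zero_of_not_mem hx, List.count_cons_self]
          omega⟩

-- B's result is also `a ~ b` (when lengths agree)
theorem B_iff_perm {a b : List Int} (h : a.length = b.length) :
    no_name__alt a b = true ↔ a.Perm b := by
  unfold no_name__alt
  simp only [h, bne_self_eq_false, Bool.false_eq_true, if_false]
  rw [altLoop_iff]
  constructor
  · intro hc
    have hsp : a.Subperm b := List.subperm_ext_iff.2 (fun x _ => hc x)
    exact hsp.perm_of_length_le (le_of_eq h.symm)
  · intro hp k
    exact le_of_eq (hp.count_eq k)

-- ===== VERDICT (by name: the statement is the Claim_ definition above) =====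
theorem no_name__spec : Claim_equal_no_name_ := by
  intro a b _hdom
  unfold Spec_no_name_
  by_cases h : a.length = b.length
  · have hA := A_iff_perm (a := a) (b := b) h
    have hB := B_iff_perm (a := a) (b := b) h
    rcases hbA : no_name_ a b with _ | _ <;> rcases hbB : no_name__alt a b with _ | _
    · rfl
    · exfalso
      rw [hbA] at hA; rw [hbB] at hB
      exact (by simpa using hA.2 : ¬ a.Perm b) (hB.1 rfl)
    · exfalso
      rw [hbA] at hA; rw [hbB] at hB
      exact (by simpa using hB.2 : ¬ a.Perm b) (hA.1 rfl)
    · rfl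
  · unfold no_name_ no_name__alt
    simp [h]
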